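-- pv_equiv track=rewrite | github.com/PrauchPort/PythonPlayground | Scramblies.py | scramble2
-- ===== SOURCE A (Python) =====
-- from collections import Counter
--
-- def scramble2(s1, s2):
--     setS1 = set(list(s1))
--     setS2 = set(list(s2))
--     countS1 = Counter(s1)
--     countS2 = Counter(s2)
--     if not setS2.issubset(setS1):
--         return False
--     for key in countS2:
--         if countS2[key] > countS1[key]:
--             return False
--     return True
-- ===== SOURCE B (Python) =====
-- from collections import Counter
--
-- def scramble2(s1, s2):
--     need = Counter(s2)
--     for c in s1:
--         if need[c] > 0:
--             need[c] -= 1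
--     return all(v <= 0 for v in need.values())
-- ===== Notes on version B (the rewrite author's own statement) =====
-- stated objective: simpler
-- what changed: B builds only one Counter for s2 and consumes it in a single pass over s1, replacing A's two Counters, two sets, subset test and per-key comparison loop by one scan plus a deficit check.
import Mathlib
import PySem

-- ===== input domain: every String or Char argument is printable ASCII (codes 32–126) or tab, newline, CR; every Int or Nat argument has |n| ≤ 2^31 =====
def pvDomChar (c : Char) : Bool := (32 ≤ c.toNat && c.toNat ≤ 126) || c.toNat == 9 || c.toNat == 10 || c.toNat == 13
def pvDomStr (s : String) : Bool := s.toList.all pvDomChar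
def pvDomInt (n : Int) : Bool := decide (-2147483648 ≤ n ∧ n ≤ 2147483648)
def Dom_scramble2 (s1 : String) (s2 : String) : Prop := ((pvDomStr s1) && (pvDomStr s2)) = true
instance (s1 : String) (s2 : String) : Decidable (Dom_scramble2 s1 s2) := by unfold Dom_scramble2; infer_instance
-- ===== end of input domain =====

-- B consumes a single Counter of s2 in one pass over s1 (objective: simpler); A builds two sets and two Counters.

-- ===== PORT A =====
def scramble2 (s1 : String) (s2 : String) : Bool :=
  let setS1 := PySem.Set.ofList s1.toList
  let setS2 := PySem.Set.ofList s2.toList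
  let countS1 := PySem.Dict.counter s1.toList
  let countS2 := PySem.Dict.counter s2.toList
  if !(PySem.Set.issubset setS2 setS1) then false
  else if countS2.keys.any (fun key => countS2.getD key 0 > countS1.getD key 0) then false
  else true

-- ===== PORT B =====
def scramble2_alt (s1 : String) (s2 : String) : Bool :=
  let need := PySem.Dict.counter s2.toList
  let need := s1.toList.foldl
    (fun d c => if d.getD c 0 > 0 then d.modify c 0 (· - 1) else d) need
  need.values.all (fun v => v ≤ 0)

-- ===== PRECONDITION & SPEC =====
def Spec_scramble2 (s1 : String) (s2 : String) (out : Bool) : Prop := out = scramble2_alt s1 s2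
instance (s1 : String) (s2 : String) (out : Bool) : Decidable (Spec_scramble2 s1 s2 out) := by unfold Spec_scramble2; infer_instance

-- ===== CLAIM (what is proved, stated in full; the proofs are below) =====
def Claim_equal_scramble2 : Prop := ∀ (s1 : String) (s2 : String), Dom_scramble2 s1 s2 → Spec_scramble2 s1 s2 (scramble2 s1 s2)

-- ===== LEMMAS AND PROOFS =====

-- After B's consuming pass, each key's remaining need is max 0 (initial - consumed) when it started positive.
theorem consume_getD (l : List Char) (d : PySem.Dict Char Int) (v : Char) :
    (l.foldl (fun d c => if d.getD c 0 > 0 then d.modify c 0 (· - 1) else d) d).getD v 0 =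
      if d.getD v 0 > 0 then max 0 (d.getD v 0 - l.count v) else d.getD v 0 := by
  induction l generalizing d with
  | nil => simp; omega
  | cons c l ih =>
    simp only [List.foldl_cons]
    by_cases hc : d.getD c 0 > 0
    · rw [if_pos hc, ih, PySem.Dict.getD_modify]
      by_cases hv : v = c
      · subst hv
        simp only [List.count_cons_self]
        push_cast
        split_ifs <;> omega
      · have hcv : ¬ c = v := fun h => hv h.symm
        simp [if_neg hv, hcv]
    · rw [if_neg hc, ih]
      by_cases hv : v = c
      · subst hv
        simp only [List.count_cons_self]
        rw [if_neg hc, if_neg hc]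
      · have hcv : ¬ c = v := fun h => hv h.symm
        simp [hcv]

-- B's pass never adds or removes keys: it only decrements keys present with a positive value.
theorem consume_keys (l : List Char) (d : PySem.Dict Char Int) :
    (l.foldl (fun d c => if d.getD c 0 > 0 then d.modify c 0 (· - 1) else d) d).keys = d.keys := by
  induction l generalizing d with
  | nil => rfl
  | cons c l ih =>
    simp only [List.foldl_cons]
    by_cases hc : d.getD c 0 > 0
    · have hcon : d.contains c = true := by
        by_contra h
        have h' : d.contains c = false := by simpa using h
        have := PySem.Dict.getD_of_not_contains d (k := c) 0 h'
        omega
      rw [if_pos hc, ih, PySem.Dict.keys_modify, PySem.Dict.keys_insert_of_contains d _ hcon]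
    · rw [if_neg hc, ih]

-- B returns true exactly when every character of s2 occurs at least as often in s1.
theorem alt_iff (s1 s2 : String) :
    scramble2_alt s1 s2 = true ↔ ∀ c ∈ s2.toList, s2.toList.count c ≤ s1.toList.count c := by
  set D := s1.toList.foldl (fun d c => if d.getD c 0 > 0 then d.modify c 0 (· - 1) else d)
      (PySem.Dict.counter s2.toList) with hD
  have hBeq : scramble2_alt s1 s2 = D.values.all (fun v => decide (v ≤ 0)) := rfl
  have hkeys : D.keys = PySem.Set.ofList s2.toList := by
    rw [hD, consume_keys, PySem.Dict.keys_counter]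
  have hnd : D.keys.Nodup := by rw [hkeys]; exact PySem.Set.nodup_ofList _
  have hget : ∀ c ∈ s2.toList,
      D.getD c 0 = max 0 ((s2.toList.count c : Int) - (s1.toList.count c : Int)) := by
    intro c hc
    have hpos : ((PySem.Dict.counter s2.toList).getD c 0) > 0 := by
      rw [PySem.Dict.getD_counter]
      exact_mod_cast List.count_pos_iff.mpr hc
    rw [hD, consume_getD, if_pos hpos, PySem.Dict.getD_counter]
  rw [hBeq, PySem.Dict.values_eq_map_keys D hnd 0, List.all_eq_true]
  constructor
  · intro h c hc
    have hcm : c ∈ D.keys := by rw [hkeys]; exact (PySem.Set.mem_ofList _ _).mpr hc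
    have hv := h (D.getD c 0) (List.mem_map_of_mem hcm)
    rw [hget c hc] at hv
    simp only [decide_eq_true_eq] at hv
    omega
  · intro h v hv
    obtain ⟨c, hcm, rfl⟩ := List.mem_map.mp hv
    have hc : c ∈ s2.toList := by
      rw [hkeys] at hcm; exact (PySem.Set.mem_ofList _ _).mp hcm
    have := h c hc
    rw [hget c hc]
    simp only [decide_eq_true_eq]
    omega

-- A returns true exactly when every character of s2 occurs at least as often in s1.
theorem a_iff (s1 s2 : String) :
    scramble2 s1 s2 = true ↔ ∀ c ∈ s2.toList, s2.toList.count c ≤ s1.toList.count c := by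
  cases hsub : PySem.Set.issubset (PySem.Set.ofList s2.toList) (PySem.Set.ofList s1.toList) with
  | false =>
    have hA : scramble2 s1 s2 = false := by
      have h0 : scramble2 s1 s2 =
        (if !(PySem.Set.issubset (PySem.Set.ofList s2.toList) (PySem.Set.ofList s1.toList)) then false
         else if (PySem.Dict.counter s2.toList).keys.any
            (fun key => decide ((PySem.Dict.counter s2.toList).getD key 0 >
              (PySem.Dict.counter s1.toList).getD key 0)) then false else true) := rfl
      rw [h0, hsub]; rfl
    rw [hA]
    constructor
    · intro h; exact absurd h (by simp)
    · intro h
      exfalso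
      have hns : ¬ ∀ x ∈ PySem.Set.ofList s2.toList, x ∈ PySem.Set.ofList s1.toList := by
        intro hall
        rw [← PySem.Set.issubset_iff, hsub] at hall
        exact Bool.false_ne_true hall
      obtain ⟨x, hx, hnx⟩ := not_forall₂.mp hns
      have hx2 : x ∈ s2.toList := (PySem.Set.mem_ofList _ _).mp hx
      have hx1 : x ∉ s1.toList := fun hm => hnx ((PySem.Set.mem_ofList _ _).mpr hm)
      have h1 : s1.toList.count x = 0 := List.count_eq_zero.mpr hx1
      have h2 : 0 < s2.toList.count x := List.count_pos_iff.mpr hx2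
      have := h x hx2
      omega
  | true =>
    cases hany : (PySem.Dict.counter s2.toList).keys.any
        (fun key => decide ((PySem.Dict.counter s2.toList).getD key 0 >
          (PySem.Dict.counter s1.toList).getD key 0)) with
    | true =>
      have hA : scramble2 s1 s2 = false := by
        have h0 : scramble2 s1 s2 =
        (if !(PySem.Set.issubset (PySem.Set.ofList s2.toList) (PySem.Set.ofList s1.toList)) then false
         else if (PySem.Dict.counter s2.toList).keys.any
            (fun key => decide ((PySem.Dict.counter s2.toList).getD key 0 >
              (PySem.Dict.counter s1.toList).getD key 0)) then false else true) := rfl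
        rw [h0, hsub, hany]; rfl
      rw [hA]
      constructor
      · intro h; exact absurd h (by simp)
      · intro h
        exfalso
        obtain ⟨k, hk, hp⟩ := List.any_eq_true.mp hany
        rw [PySem.Dict.keys_counter] at hk
        have hk2 : k ∈ s2.toList := (PySem.Set.mem_ofList _ _).mp hk
        simp only [PySem.Dict.getD_counter, decide_eq_true_eq] at hp
        have := h k hk2
        omega
    | false =>
      have hA : scramble2 s1 s2 = true := by
        have h0 : scramble2 s1 s2 =
        (if !(PySem.Set.issubset (PySem.Set.ofList s2.toList) (PySem.Set.ofList s1.toList)) then false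
         else if (PySem.Dict.counter s2.toList).keys.any
            (fun key => decide ((PySem.Dict.counter s2.toList).getD key 0 >
              (PySem.Dict.counter s1.toList).getD key 0)) then false else true) := rfl
        rw [h0, hsub, hany]; rfl
      rw [hA]
      simp only [true_iff]
      intro c hc
      have hall := List.any_eq_false.mp hany
      have hck : c ∈ (PySem.Dict.counter s2.toList).keys := by
        rw [PySem.Dict.keys_counter]; exact (PySem.Set.mem_ofList _ _).mpr hc
      have := hall c hck
      simp only [PySem.Dict.getD_counter, decide_eq_true_eq] at this
      omega

-- ===== VERDICT (by name: the statement is the Claim_ definition above) =====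
theorem scramble2_spec : Claim_equal_scramble2 := by
  intro s1 s2 _
  unfold Spec_scramble2
  rw [Bool.eq_iff_iff, a_iff, alt_iff]
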